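-- pv_equiv track=rewrite | github.com/cdhynson/SurfWatch | Crowd Detection/Data/extract.py | get_output_folder_name
-- ===== SOURCE A (Python) =====
-- def get_output_folder_name(filename):
--     """
--     Parse the filename to create output folder like A1_LT
--     """
--     filename = filename.replace(".mp4", "")
--     filename = filename.replace("(", "").replace(")", "")  # Remove all parentheses first
--     parts = filename.split()
--     tag = parts[0]  # A1, B2, etc.
--
--     # Now find the beach name words
--     beach_words = []
--     for part in parts[1:]:
--         if "-" in part and part.replace("-", "").isdigit():
--             continue  # Skip date
--         if "x" in part and part.replace("x", "").isdigit():
--             break  # Stop at resolution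
--         beach_words.append(part)
--
--     initials = "".join(word[0].upper() for word in beach_words)
--     return f"{tag}_{initials}"
-- ===== SOURCE B (Python) =====
-- def get_output_folder_name(filename):
--     s = filename.replace(".mp4", "").replace("(", "").replace(")", "")
--     parts = s.split()
--     tag, rest = parts[0], parts[1:]
--     def is_date(t):
--         return "-" in t and t.replace("-", "").isdigit()
--     def is_res(t):
--         return "x" in t and t.replace("x", "").isdigit()
--     cutoff = next((i for i, t in enumerate(rest) if is_res(t) and not is_date(t)), len(rest))
--     beach = [t for t in rest[:cutoff] if not is_date(t)]
--     return tag + "_" + "".join(w[0].upper() for w in beach)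
-- ===== Notes on version B (the rewrite author's own statement) =====
-- stated objective: alternative
-- what changed: Replaces A's single continue/break accumulator loop with a two-phase decomposition: first find the cutoff index of the first resolution-like non-date token (findIdx?/next), then take the prefix and filter out date tokens in a separate pass.
import Mathlib
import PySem

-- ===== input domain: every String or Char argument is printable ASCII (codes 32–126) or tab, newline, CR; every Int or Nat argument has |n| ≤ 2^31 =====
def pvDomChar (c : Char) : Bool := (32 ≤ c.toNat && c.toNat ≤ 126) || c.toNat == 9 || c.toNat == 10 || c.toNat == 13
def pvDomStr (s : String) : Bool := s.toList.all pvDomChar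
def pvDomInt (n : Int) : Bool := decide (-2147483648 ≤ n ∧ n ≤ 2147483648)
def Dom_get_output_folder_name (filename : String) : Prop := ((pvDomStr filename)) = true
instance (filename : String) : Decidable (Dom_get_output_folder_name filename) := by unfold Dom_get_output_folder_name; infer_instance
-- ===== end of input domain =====

-- B restructures the token scan (two phases) but computes the same value; the single one-line objective:
-- B = same result by a different decomposition (cutoff index + filter) instead of A's continue/break loop.

-- shared token predicates (both Pythons use the same two tests)
def pvClean (filename : String) : String :=
  PySem.Str.replace (PySem.Str.replace (PySem.Str.replace filename ".mp4" "") "(" "") ")" ""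

def pvIsDate (t : String) : Bool :=
  PySem.Str.isIn "-" t && PySem.Str.strIsdigit (PySem.Str.replace t "-" "")

def pvIsRes (t : String) : Bool :=
  PySem.Str.isIn "x" t && PySem.Str.strIsdigit (PySem.Str.replace t "x" "")

def pvInitial (w : String) : Char :=
  PySem.Chars.upperChar ((PySem.List.pyGet? w.toList 0).getD ' ')

-- ===== PORT A =====
-- A's for-loop with continue (date) / break (resolution) / append, as an accumulator recursion
def pvBeachLoop (acc : List String) : List String → List String
  | [] => acc
  | p :: rest =>
    if pvIsDate p then pvBeachLoop acc rest
    else if pvIsRes p then acc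
    else pvBeachLoop (acc ++ [p]) rest

def get_output_folder_name (filename : String) : String :=
  let parts := PySem.Str.split₀ (pvClean filename)
  let tag := ((PySem.List.pyGet? parts 0).getD "")   -- parts[0]; IndexError excluded by Pre_
  let beach_words := pvBeachLoop [] (PySem.List.slice parts (some 1) none)
  String.mk (tag.toList ++ '_' :: beach_words.map pvInitial)

-- ===== PORT B =====
def get_output_folder_name_alt (filename : String) : String :=
  let parts := PySem.Str.split₀ (pvClean filename)
  let tag := ((PySem.List.pyGet? parts 0).getD "")   -- parts[0]; IndexError excluded by Pre_
  let rest := parts.drop 1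
  let cutoff := (rest.findIdx? (fun t => pvIsRes t && !pvIsDate t)).getD rest.length
  let beach := (rest.take cutoff).filter (fun t => !pvIsDate t)
  String.mk (tag.toList ++ '_' :: beach.map pvInitial)

-- ===== PRECONDITION & SPEC =====
-- Pre_ excludes exactly the inputs (empty/whitespace-only after the replacements) on which both Pythons raise IndexError at parts[0]
def Pre_get_output_folder_name (filename : String) : Prop :=
  PySem.Str.split₀ (pvClean filename) ≠ []
instance (filename : String) : Decidable (Pre_get_output_folder_name filename) := by
  unfold Pre_get_output_folder_name; infer_instance

def pvWitness_get_output_folder_name : String := "A1 Long Cove 01-02 1280x720.mp4"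

def Spec_get_output_folder_name (filename : String) (out : String) : Prop := out = get_output_folder_name_alt filename
instance (filename : String) (out : String) : Decidable (Spec_get_output_folder_name filename out) := by unfold Spec_get_output_folder_name; infer_instance

-- ===== CLAIM (what is proved, stated in full; the proofs are below) =====
def Claim_equal_get_output_folder_name : Prop := ∀ (filename : String), Dom_get_output_folder_name filename → Pre_get_output_folder_name filename → Spec_get_output_folder_name filename (get_output_folder_name filename)

-- ===== LEMMAS AND PROOFS =====

theorem pvBeachLoop_eq (rest : List String) : ∀ acc,
    pvBeachLoop acc rest =
      acc ++ ((rest.take ((rest.findIdx? (fun t => pvIsRes t && !pvIsDate t)).getD rest.length)).filter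
        (fun t => !pvIsDate t)) := by
  induction rest with
  | nil => intro acc; simp [pvBeachLoop]
  | cons p rest ih =>
    intro acc
    by_cases hd : pvIsDate p = true
    · have hstop : (pvIsRes p && !pvIsDate p) = false := by simp [hd]
      simp only [pvBeachLoop, hd, if_true, List.findIdx?_cons, hstop]
      rw [ih acc]
      cases hfi : rest.findIdx? (fun t => pvIsRes t && !pvIsDate t) with
      | none => simp [hfi, List.take_succ_cons, List.filter, hd]
      | some i => simp [hfi, List.take_succ_cons, List.filter, hd]
    · by_cases hr : pvIsRes p = true
      · have hstop : (pvIsRes p && !pvIsDate p) = true := by simp [hd, hr]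
        simp [pvBeachLoop, hd, hr, List.findIdx?_cons, hstop]
      · have hstop : (pvIsRes p && !pvIsDate p) = false := by simp [hr]
        simp only [pvBeachLoop, hd, hr, if_false, List.findIdx?_cons, hstop]
        rw [ih (acc ++ [p])]
        cases hfi : rest.findIdx? (fun t => pvIsRes t && !pvIsDate t) with
        | none => simp [hfi, List.take_succ_cons, List.filter, hd]
        | some i => simp [hfi, List.take_succ_cons, List.filter, hd]

theorem pvSlice_one (l : List String) : PySem.List.slice l (some 1) none = l.drop 1 := by
  simp [PySem.List.slice_from_one, List.drop_one]

-- ===== VERDICT (by name: the statement is the Claim_ definition above) =====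
theorem get_output_folder_name_spec : Claim_equal_get_output_folder_name := by
  intro filename _ _
  unfold Spec_get_output_folder_name get_output_folder_name get_output_folder_name_alt
  simp only [pvSlice_one, pvBeachLoop_eq, List.nil_append]
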